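-- pv_equiv track=rewrite | github.com/FangfanLi/throttling_implementation_analysis | streaming/plot_streaming_test_multiconn_seq.py | sort_quality_change
-- ===== SOURCE A (Python) =====
-- VIDEO_QUALITY_SORTING_MAP = {"144p": 1,
--                              "240p": 2,
--                              "360p": 3,
--                              "480p": 4,
--                              "720p": 5,
--                              "1080p": 6,
--                              "1440p": 7,
--                              "2160p": 8
--                              }
--
-- def sort_quality_change(video_qualities):
--     if not video_qualities:
--         return [], []
--     quality_change = {}
--
--     current_start_timestamp = video_qualities[0][1]
--     current_quality = video_qualities[0][0]
--     for video_quality_sample in video_qualities: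
--         if video_quality_sample[0] != current_quality:
--             current_quality_interval = [current_start_timestamp, video_quality_sample[1]]
--             if current_quality in quality_change:
--                 quality_change[current_quality].append(current_quality_interval)
--             else:
--                 quality_change[current_quality] = [current_quality_interval]
--             current_start_timestamp = video_quality_sample[1]
--             current_quality = video_quality_sample[0]
--
--     last_quality_sample = video_qualities[-1]
--     if last_quality_sample[1] != current_start_timestamp:
--         if current_quality in quality_change:
--             quality_change[current_quality].append(
--                 [current_start_timestamp, last_quality_sample[1]])
--         else:
--             quality_change[current_quality] = [
--                 [current_start_timestamp, last_quality_sample[1]]]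
--
--     sorted_quality_change_keys = sorted(quality_change.keys(), key=lambda x: VIDEO_QUALITY_SORTING_MAP[x])
--
--     return quality_change, sorted_quality_change_keys
-- ===== SOURCE B (Python) =====
-- VIDEO_QUALITY_SORTING_MAP = {"144p": 1,
--                              "240p": 2,
--                              "360p": 3,
--                              "480p": 4,
--                              "720p": 5,
--                              "1080p": 6,
--                              "1440p": 7,
--                              "2160p": 8
--                              }
--
--
-- def sort_quality_change(video_qualities):
--     if not video_qualities:
--         return [], []
--     # run starts: the first sample, plus every sample whose quality differs from its predecessor
--     starts = [video_qualities[0]] + [b for a, b in zip(video_qualities, video_qualities[1:])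
--                                      if b[0] != a[0]]
--     quality_change = {}
--     # every non-final run yields an interval [its start, next run's start]
--     for (q, t0), (_, t1) in zip(starts, starts[1:]):
--         quality_change.setdefault(q, []).append([t0, t1])
--     # the final run yields an interval only if it has nonzero length
--     q_last, t_start = starts[-1]
--     t_end = video_qualities[-1][1]
--     if t_end != t_start:
--         quality_change.setdefault(q_last, []).append([t_start, t_end])
--     sorted_keys = sorted(quality_change, key=VIDEO_QUALITY_SORTING_MAP.get)
--     return quality_change, sorted_keys
-- ===== Notes on version B (the rewrite author's own statement) =====
-- stated objective: idiomatic
-- what changed: A's one-pass state machine (carrying current quality, run start and a growing dict) is replaced by a two-phase decomposition: first extract the run-start list via zip over adjacent samples, then build the interval dict by pairing consecutive run starts with zip and setdefault, with the last run handled once at the end.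
import Mathlib
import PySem

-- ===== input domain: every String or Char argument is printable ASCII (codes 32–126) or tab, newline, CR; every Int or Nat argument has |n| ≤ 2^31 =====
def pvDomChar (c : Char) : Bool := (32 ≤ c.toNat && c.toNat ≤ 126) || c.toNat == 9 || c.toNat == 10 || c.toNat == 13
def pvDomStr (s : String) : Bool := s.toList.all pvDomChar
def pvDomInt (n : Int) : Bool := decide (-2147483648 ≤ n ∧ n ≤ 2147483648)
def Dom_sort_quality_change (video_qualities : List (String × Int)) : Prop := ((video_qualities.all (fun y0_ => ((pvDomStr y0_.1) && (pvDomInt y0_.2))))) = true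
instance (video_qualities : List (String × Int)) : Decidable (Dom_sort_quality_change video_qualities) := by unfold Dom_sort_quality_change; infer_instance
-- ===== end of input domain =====

-- B replaces A's one-pass state machine by two phases (extract the run-start list, then pair
-- consecutive run starts); equivalence of the RETURN values is proved (neither mutates its input).

-- ===== PORT A =====
-- VIDEO_QUALITY_SORTING_MAP
def sqcMap : PySem.Dict String Int :=
  PySem.Dict.ofList [("144p", 1), ("240p", 2), ("360p", 3), ("480p", 4),
                     ("720p", 5), ("1080p", 6), ("1440p", 7), ("2160p", 8)]

-- the `if current_quality in quality_change: append else: create` block of A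
-- (`quality_change[cq].append(itv)` is `modify cq [] (· ++ [itv])`: key present, so the default is unused)
def sqcAppend (qc : PySem.Dict String (List (List Int))) (cq : String) (itv : List Int) :
    PySem.Dict String (List (List Int)) :=
  if qc.contains cq then qc.modify cq [] (fun l => l ++ [itv]) else qc.insert cq [itv]

-- one iteration of A's for-loop; state = (quality_change, current_start_timestamp, current_quality)
def sqcStep (s : PySem.Dict String (List (List Int)) × Int × String) (sample : String × Int) :
    PySem.Dict String (List (List Int)) × Int × String :=
  if sample.1 ≠ s.2.2 then (sqcAppend s.1 s.2.2 [s.2.1, sample.2], sample.2, sample.1) else s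

def sort_quality_change (video_qualities : List (String × Int)) :
    (List (String × List (List Int))) × List String :=
  match video_qualities with
  | [] => ([], [])
  | x0 :: rest =>
    let st := List.foldl sqcStep (PySem.Dict.empty, x0.2, x0.1) (x0 :: rest)
    let last := (x0 :: rest).getLast (List.cons_ne_nil x0 rest)
    let qc := if last.2 ≠ st.2.1 then sqcAppend st.1 st.2.2 [st.2.1, last.2] else st.1
    -- `key=VIDEO_QUALITY_SORTING_MAP[x]` ported via getD: Pre_ guarantees every key is in the map
    (qc.items, PySem.List.sorted qc.keys (fun x => sqcMap.getD x 0) false)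

-- ===== PORT B =====
-- `quality_change.setdefault(q, []).append([t0, t1])`
def sqcPairStep (d : PySem.Dict String (List (List Int)))
    (pr : (String × Int) × (String × Int)) : PySem.Dict String (List (List Int)) :=
  PySem.Dict.modify d pr.1.1 [] (fun l => l ++ [[pr.1.2, pr.2.2]])

def sort_quality_change_alt (video_qualities : List (String × Int)) :
    (List (String × List (List Int))) × List String :=
  match video_qualities with
  | [] => ([], [])
  | x0 :: rest =>
    -- starts = [vq[0]] + [b for a, b in zip(vq, vq[1:]) if b[0] != a[0]]
    let starts := x0 :: ((((x0 :: rest).zip rest).filter (fun p => p.2.1 != p.1.1)).map Prod.snd)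
    let qc0 := (starts.zip starts.tail).foldl sqcPairStep PySem.Dict.empty
    let lastStart := starts.getLast (List.cons_ne_nil _ _)
    let tEnd := ((x0 :: rest).getLast (List.cons_ne_nil x0 rest)).2
    let qc := if tEnd ≠ lastStart.2
      then PySem.Dict.modify qc0 lastStart.1 [] (fun l => l ++ [[lastStart.2, tEnd]]) else qc0
    -- `key=VIDEO_QUALITY_SORTING_MAP.get` ported via getD: Pre_ guarantees every key is in the map
    (qc.items, PySem.List.sorted qc.keys (fun x => sqcMap.getD x 0) false)

-- ===== PRECONDITION & SPEC =====
def sqcKnown (q : String) : Bool :=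
  ["144p", "240p", "360p", "480p", "720p", "1080p", "1440p", "2160p"].contains q

-- Pre_ excludes exactly the inputs on which A raises KeyError: sorting looks up
-- VIDEO_QUALITY_SORTING_MAP[x] for each quality that completed an interval, i.e. the quality of
-- every run that is followed by another run, and of the final run when its start timestamp
-- differs from the last sample's timestamp; all those qualities must be known labels.
def Pre_sort_quality_change (video_qualities : List (String × Int)) : Prop :=
  (((video_qualities.zip video_qualities.tail).all
      (fun p => p.2.1 == p.1.1 || sqcKnown p.1.1)) &&
   (match video_qualities.getLast? with
    | none => true
    | some (q, te) =>
      match (video_qualities.reverse.takeWhile (fun p => p.1 == q)).getLast? with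
      | none => true
      | some ls => (te == ls.2) || sqcKnown q)) = true
instance (video_qualities : List (String × Int)) : Decidable (Pre_sort_quality_change video_qualities) := by
  unfold Pre_sort_quality_change; infer_instance

def pvWitness_sort_quality_change : (List (String × Int)) := [("144p", 0), ("240p", 3), ("240p", 5)]

def Spec_sort_quality_change (video_qualities : List (String × Int)) (out : (List (String × List (List Int))) × List String) : Prop := out = sort_quality_change_alt video_qualities
instance (video_qualities : List (String × Int)) (out : (List (String × List (List Int))) × List String) : Decidable (Spec_sort_quality_change video_qualities out) := by unfold Spec_sort_quality_change; infer_instance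

-- ===== CLAIM (what is proved, stated in full; the proofs are below) =====
def Claim_equal_sort_quality_change : Prop := ∀ (video_qualities : List (String × Int)), Dom_sort_quality_change video_qualities → Pre_sort_quality_change video_qualities → Spec_sort_quality_change video_qualities (sort_quality_change video_qualities)

-- ===== LEMMAS AND PROOFS =====

-- the run-start list of `(q, t) :: ys`, minus its head, as a recursion
def sqcRuns (q : String) (ys : List (String × Int)) : List (String × Int) :=
  match ys with
  | [] => []
  | y :: t => if y.1 ≠ q then y :: sqcRuns y.1 t else sqcRuns q t

-- B's zip/filter run-start list is sqcRuns
lemma sqcRuns_eq (rest : List (String × Int)) : ∀ (x : String × Int),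
    ((((x :: rest).zip rest).filter (fun p => p.2.1 != p.1.1)).map Prod.snd) = sqcRuns x.1 rest := by
  induction rest with
  | nil => intro x; rfl
  | cons y t ih =>
    intro x
    simp only [List.zip_cons_cons, List.filter_cons, sqcRuns]
    by_cases h : y.1 = x.1
    · simp [h, ih y]
    · simp [h, ih y]

lemma sqcAppend_eq_modify (d : PySem.Dict String (List (List Int))) (k : String) (itv : List Int) :
    sqcAppend d k itv = d.modify k [] (fun l => l ++ [itv]) := by
  unfold sqcAppend
  by_cases h : d.contains k = true
  · simp [h]
  · have h' : d.contains k = false := by simpa using h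
    simp [h', PySem.Dict.modify, PySem.Dict.getD_of_not_contains d [] h']

-- pairing of consecutive run starts, as a recursion carrying the previous run start
def sqcPairFold (d : PySem.Dict String (List (List Int))) (p : String × Int)
    (R : List (String × Int)) : PySem.Dict String (List (List Int)) × Int × String :=
  match R with
  | [] => (d, p.2, p.1)
  | r :: R' => sqcPairFold (sqcPairStep d (p, r)) r R'

-- A's loop = pairing of consecutive run starts
lemma sqcFoldA (ys : List (String × Int)) :
    ∀ (d : PySem.Dict String (List (List Int))) (t : Int) (q : String),
    List.foldl sqcStep (d, t, q) ys = sqcPairFold d (q, t) (sqcRuns q ys) := by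
  induction ys with
  | nil => intro d t q; rfl
  | cons y ys' ih =>
    intro d t q
    simp only [List.foldl_cons, sqcStep, sqcRuns]
    by_cases h : y.1 = q
    · simp only [h, ne_eq, not_true_eq_false, if_false]
      exact ih d t q
    · simp only [ne_eq, h, not_false_iff, if_true]
      rw [ih, sqcAppend_eq_modify]
      rfl

-- the paired recursion = B's fold over zip(starts, starts[1:]), with final state = last run start
lemma sqcFoldB (R : List (String × Int)) :
    ∀ (d : PySem.Dict String (List (List Int))) (p : String × Int),
    sqcPairFold d p R =
      (((p :: R).zip R).foldl sqcPairStep d,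
       ((p :: R).getLast (List.cons_ne_nil p R)).2,
       ((p :: R).getLast (List.cons_ne_nil p R)).1) := by
  induction R with
  | nil => intro d p; rfl
  | cons r R' ih =>
    intro d p
    simp only [sqcPairFold, List.zip_cons_cons, List.foldl_cons, List.getLast_cons (List.cons_ne_nil r R')]
    exact ih (sqcPairStep d (p, r)) r

lemma sqc_main (xs : List (String × Int)) : sort_quality_change xs = sort_quality_change_alt xs := by
  cases xs with
  | nil => rfl
  | cons x0 rest =>
    have h0 : List.foldl sqcStep (PySem.Dict.empty, x0.2, x0.1) (x0 :: rest)
        = sqcPairFold PySem.Dict.empty x0 (sqcRuns x0.1 rest) := by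
      rw [List.foldl_cons]
      have hs : sqcStep (PySem.Dict.empty, x0.2, x0.1) x0 = (PySem.Dict.empty, x0.2, x0.1) := by
        simp [sqcStep]
      rw [hs, sqcFoldA]
    simp only [sort_quality_change, sort_quality_change_alt, sqcRuns_eq rest x0, h0,
      sqcFoldB (sqcRuns x0.1 rest) PySem.Dict.empty x0, sqcAppend_eq_modify, List.tail_cons]

-- ===== VERDICT (by name: the statement is the Claim_ definition above) =====
theorem sort_quality_change_spec : Claim_equal_sort_quality_change := by
  intro xs _ _
  unfold Spec_sort_quality_change
  exact sqc_main xs
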